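-- pv_equiv track=rewrite | github.com/pypi-data/pypi-mirror-380 | packages/divelogpy/divelogpy-0.1.5-py3-none-any.whl/divelogpy/models.py | _select_first_available_field
-- ===== SOURCE A (Python) =====
-- from typing import Any, Dict, Iterable, Iterator, List, Mapping, Sequence, Tuple, TYPE_CHECKING
--
-- def _select_first_available_field(
--     samples: Sequence[Dict[str, Any]] | None,
--     candidates: Sequence[str],
-- ) -> str | None:
--     if not candidates:
--         return None
--     if not samples:
--         return candidates[0]
--
--     for field in candidates:
--         for sample in samples:
--             value = _retrieve_sample_value(sample, field)
--             if value not in (None, 0, 65535, 65534):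
--                 return field
--     return candidates[0]
--
-- def _retrieve_sample_value(sample: Dict[str, Any], field: str) -> Any:
--     return sample.get(field)
-- ===== SOURCE B (Python) =====
-- def _select_first_available_field(samples, candidates):
--     if not candidates:
--         return None
--     if not samples:
--         return candidates[0]
--     best = len(candidates)  # sentinel: no candidate seen with a valid value yet
--     for sample in samples:
--         for idx in range(best):
--             if sample.get(candidates[idx]) not in (None, 0, 65535, 65534):
--                 best = idx
--                 break
--         if best == 0:
--             break  # top-priority candidate found; nothing can beat it
--     return candidates[best] if best < len(candidates) else candidates[0]
-- ===== Notes on version B (the rewrite author's own statement) =====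
-- stated objective: alternative
-- what changed: B replaces A's candidate-major loop (a full rescan of all samples per candidate) with a single sample-major pass that keeps a running best candidate index, scanning each sample only below the current best and breaking once the top-priority candidate is found.
import Mathlib
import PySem

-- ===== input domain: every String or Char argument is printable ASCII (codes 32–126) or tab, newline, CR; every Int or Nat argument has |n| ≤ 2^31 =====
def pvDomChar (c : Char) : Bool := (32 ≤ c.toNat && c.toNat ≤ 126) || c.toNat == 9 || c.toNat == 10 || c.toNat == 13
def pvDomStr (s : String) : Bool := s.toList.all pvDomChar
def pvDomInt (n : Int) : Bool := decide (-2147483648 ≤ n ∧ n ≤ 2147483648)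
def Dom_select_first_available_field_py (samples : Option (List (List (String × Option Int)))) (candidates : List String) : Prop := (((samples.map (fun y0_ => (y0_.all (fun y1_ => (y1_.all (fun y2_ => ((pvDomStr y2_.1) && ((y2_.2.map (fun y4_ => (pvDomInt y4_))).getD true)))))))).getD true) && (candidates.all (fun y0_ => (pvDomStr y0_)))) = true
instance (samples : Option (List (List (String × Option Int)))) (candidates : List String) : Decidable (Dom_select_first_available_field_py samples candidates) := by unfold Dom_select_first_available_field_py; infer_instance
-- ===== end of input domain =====

-- B replaces A's candidate-major rescans (restart over all samples per candidate) by a single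
-- sample-major pass keeping a running best candidate index with early break (alternative decomposition).

-- shared helper: sample.get(field) (dict lookup = first match in the association list)
def pvLookup (sample : List (String × Option Int)) (field : String) : Option (Option Int) :=
  (sample.find? (fun p => p.1 == field)).map (·.2)

-- shared helper: value not in (None, 0, 65535, 65534)
def pvValid (v : Option (Option Int)) : Bool :=
  match v with
  | some (some n) => !(n == 0 || n == 65535 || n == 65534)
  | _ => false

-- ===== PORT A =====
-- the nested for-loops with early return
def pvALoop (ss : List (List (String × Option Int))) (cands : List String) : Option String :=
  match cands with
  | [] => none
  | f :: rest =>
      if ss.any (fun s => pvValid (pvLookup s f)) then some f else pvALoop ss rest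

def select_first_available_field_py (samples : Option (List (List (String × Option Int)))) (candidates : List String) : Option String :=
  match candidates with
  | [] => none
  | c0 :: _ =>
    match samples with
    | none => some c0
    | some ss =>
      if ss.isEmpty then some c0
      else
        match pvALoop ss candidates with
        | some f => some f
        | none => some c0

-- ===== PORT B =====
-- 'for idx in range(limit): if valid: best = idx; break' — the first valid index below limit
def pvFirstValid (s : List (String × Option Int)) (cands : List String) (limit : Nat) : Option Nat :=
  (List.range limit).find? (fun idx => pvValid (pvLookup s (cands.getD idx "")))

-- the sample loop maintaining the running best index (sentinel = cands.length), breaking at 0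
def pvBestLoop (cands : List String) (ss : List (List (String × Option Int))) (best : Nat) : Nat :=
  match ss with
  | [] => best
  | s :: rest =>
    let best' := match pvFirstValid s cands best with
                 | some idx => idx
                 | none => best
    if best' = 0 then best' else pvBestLoop cands rest best'

def select_first_available_field_py_alt (samples : Option (List (List (String × Option Int)))) (candidates : List String) : Option String :=
  match candidates with
  | [] => none
  | c0 :: _ =>
    match samples with
    | none => some c0
    | some ss =>
      if ss.isEmpty then some c0
      else
        let best := pvBestLoop candidates ss candidates.length
        if best < candidates.length then some (candidates.getD best c0) else some c0

-- ===== PRECONDITION & SPEC =====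
def Spec_select_first_available_field_py (samples : Option (List (List (String × Option Int)))) (candidates : List String) (out : Option String) : Prop := out = select_first_available_field_py_alt samples candidates
instance (samples : Option (List (List (String × Option Int)))) (candidates : List String) (out : Option String) : Decidable (Spec_select_first_available_field_py samples candidates out) := by unfold Spec_select_first_available_field_py; infer_instance

-- ===== CLAIM (what is proved, stated in full; the proofs are below) =====
def Claim_equal_select_first_available_field_py : Prop := ∀ (samples : Option (List (List (String × Option Int)))) (candidates : List String), Dom_select_first_available_field_py samples candidates → Spec_select_first_available_field_py samples candidates (select_first_available_field_py samples candidates)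

-- ===== LEMMAS AND PROOFS =====

-- proof-only abbreviations: the per-sample index predicate, its any-over-samples form,
-- and 'first index < n satisfying P, sentinel n'
def pvP (cands : List String) (s : List (String × Option Int)) (i : Nat) : Bool :=
  pvValid (pvLookup s (cands.getD i ""))

def pvQ (cands : List String) (ss : List (List (String × Option Int))) (i : Nat) : Bool :=
  ss.any (fun s => pvP cands s i)

def pvIdxOf (P : Nat → Bool) (n : Nat) : Nat := ((List.range n).find? P).getD n

-- A's nested loops are a find? over the candidates
lemma pvALoop_eq_find? (ss : List (List (String × Option Int))) (cands : List String) :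
    pvALoop ss cands = cands.find? (fun f => ss.any (fun s => pvValid (pvLookup s f))) := by
  induction cands with
  | nil => rfl
  | cons f rest ih =>
    rw [pvALoop, List.find?_cons]
    by_cases h : ss.any (fun s => pvValid (pvLookup s f)) = true
    · simp [h]
    · simp only [Bool.not_eq_true] at h
      simp [h, ih]

-- find? over a list = find? over its index range, mapped back
lemma find?_eq_find?_range (P : String → Bool) (d : String) (cands : List String) :
    cands.find? P =
      ((List.range cands.length).find? (fun i => P (cands.getD i d))).map
        (fun i => cands.getD i d) := by
  induction cands with
  | nil => rfl
  | cons c cs ih =>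
    rw [List.find?_cons, List.length_cons, List.range_succ_eq_map, List.find?_cons]
    by_cases h : P c = true
    · simp [h]
    · simp only [Bool.not_eq_true] at h
      simp only [List.getD_cons_zero, h, List.find?_map, Option.map_map]
      rw [ih]
      rfl

-- first index where either predicate holds = min of the two first indices
lemma find?_or_min (p r : Nat → Bool) (n : Nat) :
    ∀ l : List Nat, l.Pairwise (· < ·) → (∀ y ∈ l, y < n) →
      (l.find? (fun x => p x || r x)).getD n =
        min ((l.find? p).getD n) ((l.find? r).getD n) := by
  intro l hpw hbd
  induction l with
  | nil => simp
  | cons x xs ih =>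
    have hx : x < n := hbd x (List.mem_cons_self ..)
    have hlt : ∀ y ∈ xs, x < y := (List.pairwise_cons.mp hpw).1
    have hle_p : x ≤ (xs.find? p).getD n := by
      cases h : xs.find? p with
      | none => simpa using Nat.le_of_lt hx
      | some y => simpa using Nat.le_of_lt (hlt y (List.mem_of_find?_eq_some h))
    have hle_r : x ≤ (xs.find? r).getD n := by
      cases h : xs.find? r with
      | none => simpa using Nat.le_of_lt hx
      | some y => simpa using Nat.le_of_lt (hlt y (List.mem_of_find?_eq_some h))
    rw [List.find?_cons, List.find?_cons, List.find?_cons]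
    by_cases hp : p x = true <;> by_cases hr : r x = true
    · simp [hp, hr]
    · simp only [Bool.not_eq_true] at hr
      simp only [hp, hr, Bool.true_or]
      simp only [Option.getD_some]
      omega
    · simp only [Bool.not_eq_true] at hp
      simp only [hp, hr, Bool.false_or]
      simp only [Option.getD_some]
      omega
    · simp only [Bool.not_eq_true] at hp hr
      simp only [hp, hr, Bool.false_or]
      exact ih (List.pairwise_cons.mp hpw).2 (fun y hy => hbd y (List.mem_cons_of_mem _ hy))

-- pvIdxOf never exceeds its sentinel
lemma pvIdxOf_le (P : Nat → Bool) (n : Nat) : pvIdxOf P n ≤ n := by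
  unfold pvIdxOf
  cases h : (List.range n).find? P with
  | none => simp
  | some i =>
    have := List.mem_of_find?_eq_some h
    simp only [List.mem_range] at this
    simpa using Nat.le_of_lt this

-- the inner scan bounded by the current best computes min best (first full index)
lemma step_min (cands : List String) (s : List (String × Option Int)) (b : Nat)
    (hb : b ≤ cands.length) :
    (match pvFirstValid s cands b with
     | some idx => idx
     | none => b) = min b (pvIdxOf (pvP cands s) cands.length) := by
  have hsplit : List.range cands.length = List.range b ++ (List.range (cands.length - b)).map (fun x => b + x) := by
    rw [← List.range_add]
    congr 1
    omega
  unfold pvFirstValid pvIdxOf pvP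
  rw [hsplit, List.find?_append]
  cases h : (List.range b).find? (fun idx => pvValid (pvLookup s (cands.getD idx ""))) with
  | some i =>
    have hi : i < b := by
      have := List.mem_of_find?_eq_some h
      simpa [List.mem_range] using this
    simp only [Option.some_or, Option.getD_some]
    omega
  | none =>
    simp only [Option.none_or]
    cases h2 : ((List.range (cands.length - b)).map (fun x => b + x)).find? (fun idx => pvValid (pvLookup s (cands.getD idx ""))) with
    | none => simp; omega
    | some j =>
      have hj : b ≤ j := by
        have := List.mem_of_find?_eq_some h2
        simp only [List.mem_map, List.mem_range] at this
        omega
      simp only [Option.getD_some]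
      omega

-- once the best index is 0 nothing can lower it
lemma foldl_min_zero (cands : List String) (ss : List (List (String × Option Int))) :
    ss.foldl (fun b s => min b (pvIdxOf (pvP cands s) cands.length)) 0 = 0 := by
  induction ss with
  | nil => rfl
  | cons s rest ih => simpa using ih

-- the sample loop with its break = the break-free min-fold
lemma bestLoop_eq_foldl (cands : List String) (ss : List (List (String × Option Int))) :
    ∀ b, b ≤ cands.length →
      pvBestLoop cands ss b =
        ss.foldl (fun b s => min b (pvIdxOf (pvP cands s) cands.length)) b := by
  induction ss with
  | nil => intro b _; rfl
  | cons s rest ih =>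
    intro b hb
    rw [pvBestLoop, List.foldl_cons]
    rw [step_min cands s b hb]
    by_cases h0 : min b (pvIdxOf (pvP cands s) cands.length) = 0
    · simp only [h0, if_true]
      exact (foldl_min_zero cands rest).symm
    · simp only [h0, if_false]
      exact ih _ (le_trans (Nat.min_le_left _ _) hb)

-- the min-fold computes the first index valid in ANY sample
lemma foldl_min_eq_idxOf (cands : List String) (ss : List (List (String × Option Int))) :
    ∀ b, b ≤ cands.length →
      ss.foldl (fun b s => min b (pvIdxOf (pvP cands s) cands.length)) b =
        min b (pvIdxOf (pvQ cands ss) cands.length) := by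
  induction ss with
  | nil =>
    intro b hb
    have hnone : (List.range cands.length).find? (pvQ cands []) = none := by
      simp [List.find?_eq_none, pvQ]
    have : pvIdxOf (pvQ cands []) cands.length = cands.length := by
      unfold pvIdxOf
      rw [hnone]
      rfl
    rw [List.foldl_nil, this]
    omega
  | cons s rest ih =>
    intro b hb
    rw [List.foldl_cons, ih _ (le_trans (Nat.min_le_left _ _) hb)]
    have hor : pvIdxOf (pvQ cands (s :: rest)) cands.length =
        min (pvIdxOf (pvP cands s) cands.length) (pvIdxOf (pvQ cands rest) cands.length) := by
      unfold pvIdxOf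
      have hfun : pvQ cands (s :: rest) = fun i => pvP cands s i || pvQ cands rest i := by
        funext i
        simp [pvQ]
      rw [hfun]
      exact find?_or_min (pvP cands s) (pvQ cands rest) cands.length (List.range cands.length)
        List.pairwise_lt_range (fun y hy => List.mem_range.mp hy)
    rw [hor]
    omega

-- ===== VERDICT (by name: the statement is the Claim_ definition above) =====
theorem select_first_available_field_py_spec : Claim_equal_select_first_available_field_py := by
  intro samples candidates _
  unfold Spec_select_first_available_field_py select_first_available_field_py select_first_available_field_py_alt
  match candidates with
  | [] => rfl
  | c0 :: rest =>
    match samples with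
    | none => rfl
    | some ss =>
      by_cases h : ss.isEmpty
      · simp [h]
      · simp only [h]
        have hbest : pvBestLoop (c0 :: rest) ss (c0 :: rest).length =
            pvIdxOf (pvQ (c0 :: rest) ss) (c0 :: rest).length := by
          rw [bestLoop_eq_foldl (c0 :: rest) ss (c0 :: rest).length (le_refl _),
              foldl_min_eq_idxOf _ _ _ (le_refl _)]
          have := pvIdxOf_le (pvQ (c0 :: rest) ss) (c0 :: rest).length
          omega
        rw [hbest, pvALoop_eq_find?,
            find?_eq_find?_range (fun f => ss.any (fun s => pvValid (pvLookup s f))) "" (c0 :: rest)]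
        have hq : (fun i => ss.any (fun s => pvValid (pvLookup s ((c0 :: rest).getD i "")))) =
            pvQ (c0 :: rest) ss := by
          funext i
          simp [pvQ, pvP]
        rw [hq]
        unfold pvIdxOf
        cases hf : (List.range (c0 :: rest).length).find? (pvQ (c0 :: rest) ss) with
        | none => simp
        | some i =>
          have hi : i < (c0 :: rest).length := by
            have := List.mem_of_find?_eq_some hf
            simpa [List.mem_range] using this
          simp only [Option.map_some, Option.getD_some, hi, if_pos]
          rw [List.getD_eq_getElem _ _ hi, List.getD_eq_getElem _ _ hi]
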